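-- pv_equiv track=rewrite | github.com/aiyanazhang/aiyanazhang-1 | file-cleaner/src/input_validator.py | _calculate_regex_complexity
-- ===== SOURCE A (Python) =====
-- def _calculate_regex_complexity(pattern: str) -> int:
--     """
--     计算正则表达式复杂度
--
--     Args:
--         pattern: 正则表达式
--
--     Returns:
--         复杂度分数
--     """
--     complexity = 0
--
--     # 基础长度
--     complexity += len(pattern) // 10
--
--     # 特殊字符计分
--     special_chars = {
--         '*': 2, '+': 2, '?': 1, '{': 3, '}': 3,
--         '(': 2, ')': 2, '[': 2, ']': 2, '|': 3,
--         '^': 1, '$': 1, '\\': 1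
--     }
--
--     for char, score in special_chars.items():
--         complexity += pattern.count(char) * score
--
--     return complexity
-- ===== SOURCE B (Python) =====
-- def _score(ch: str) -> int:
--     """Score a single character by class-membership tests (no dict)."""
--     if ch in '{}|':
--         return 3
--     if ch in '*+()[]':
--         return 2
--     if ch in '?^$\\':
--         return 1
--     return 0
--
--
-- def _calculate_regex_complexity(pattern: str) -> int:
--     """Single pass: length credit plus the sum of per-character class scores,
--     computed by a branch-chain scoring helper instead of 13 full-string counts."""
--     return len(pattern) // 10 + sum(map(_score, pattern))
-- ===== Notes on version B (the rewrite author's own statement) =====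
-- stated objective: alternative
-- what changed: B replaces A's 13 separate pattern.count(char) full scans over a score dict with one pass summing a branch-chain per-character classifier (character-class membership tests, no dict); the total is identical because the classifier encodes the same score table.
import Mathlib
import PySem

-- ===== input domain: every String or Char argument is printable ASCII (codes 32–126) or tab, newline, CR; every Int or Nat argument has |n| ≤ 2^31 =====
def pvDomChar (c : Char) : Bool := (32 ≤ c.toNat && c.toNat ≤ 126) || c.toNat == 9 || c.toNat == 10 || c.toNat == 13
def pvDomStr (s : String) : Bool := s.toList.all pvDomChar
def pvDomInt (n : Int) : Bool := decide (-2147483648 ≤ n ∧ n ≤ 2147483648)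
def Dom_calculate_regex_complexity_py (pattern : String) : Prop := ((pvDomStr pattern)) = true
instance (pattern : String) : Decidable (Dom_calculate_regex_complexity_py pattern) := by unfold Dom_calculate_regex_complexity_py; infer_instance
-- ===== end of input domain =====

-- B replaces A's 13 separate full-string count scans over a score dict with one pass
-- summing a branch-chain per-character classifier (objective: alternative strategy).


-- ===== PORT A =====
-- A's dict literal of per-character scores.
def pvSpecialChars : PySem.Dict Char Int := PySem.Dict.ofList
  [('*', 2), ('+', 2), ('?', 1), ('{', 3), ('}', 3),
   ('(', 2), (')', 2), ('[', 2), (']', 2), ('|', 3),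
   ('^', 1), ('$', 1), ('\\', 1)]

-- pattern.count(char) for the single-character key is PySem.Str.count with the
-- one-character string (exact).
def calculate_regex_complexity_py (pattern : String) : Int :=
  let complexity : Int := 0
  let complexity := complexity + PySem.Int.floordiv (PySem.Str.len pattern) 10
  pvSpecialChars.items.foldl
    (fun complexity cs => complexity + (PySem.Str.count pattern (String.ofList [cs.1]) : Int) * cs.2)
    complexity

-- ===== PORT B =====
-- Source B's _score: Python 'ch in <string>' for a single char is membership in its chars.
def pvScore (ch : Char) : Int :=
  if "{}|".toList.contains ch then 3
  else if "*+()[]".toList.contains ch then 2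
  else if "?^$\\".toList.contains ch then 1
  else 0

def calculate_regex_complexity_py_alt (pattern : String) : Int :=
  PySem.Int.floordiv (PySem.Str.len pattern) 10 + (pattern.toList.map pvScore).sum

-- ===== PRECONDITION & SPEC =====
def Spec_calculate_regex_complexity_py (pattern : String) (out : Int) : Prop := out = calculate_regex_complexity_py_alt pattern
instance (pattern : String) (out : Int) : Decidable (Spec_calculate_regex_complexity_py pattern out) := by unfold Spec_calculate_regex_complexity_py; infer_instance

-- ===== CLAIM =====
def Claim_equal_calculate_regex_complexity_py : Prop := ∀ (pattern : String), Dom_calculate_regex_complexity_py pattern → Spec_calculate_regex_complexity_py pattern (calculate_regex_complexity_py pattern)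

-- ===== LEMMAS AND PROOFS =====

-- Python's substring count, restricted to a single-character needle, is List.count.
theorem pv_count_go_single (c : Char) (fuel : Nat) (l : List Char) (acc : Nat) (h : l.length ≤ fuel) :
    PySem.Chars.count.go [c] fuel l acc = acc + l.count c := by
  induction l generalizing fuel acc with
  | nil => cases fuel <;> simp [PySem.Chars.count.go]
  | cons x t ih =>
    cases fuel with
    | zero => simp at h
    | succ f =>
      rw [PySem.Chars.count.go]
      simp only [List.isPrefixOf, List.length_cons] at *
      by_cases hx : x = c
      · subst hx
        simp only [List.length_nil, Nat.zero_add, List.drop_succ_cons, List.drop_zero]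
        simp [ih f (acc + 1) (by omega)]
        omega
      · simp [hx, beq_iff_eq, Ne.symm hx, ih f acc (by omega)]

theorem pv_count_single (l : List Char) (c : Char) :
    PySem.Chars.count l [c] = l.count c := by
  rw [PySem.Chars.count]; simp [pv_count_go_single c l.length l 0 le_rfl]

-- The per-character contribution of A's 13 count terms equals B's classifier score.
theorem pv_key_sum (ch : Char) :
    (pvSpecialChars.items.map
      (fun cs => (if cs.1 = ch then (1 : Int) else 0) * cs.2)).sum
    = pvScore ch := by
  by_cases h1 : '*' = ch; · subst h1; decide
  by_cases h2 : '+' = ch; · subst h2; decide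
  by_cases h3 : '?' = ch; · subst h3; decide
  by_cases h4 : '{' = ch; · subst h4; decide
  by_cases h5 : '}' = ch; · subst h5; decide
  by_cases h6 : '(' = ch; · subst h6; decide
  by_cases h7 : ')' = ch; · subst h7; decide
  by_cases h8 : '[' = ch; · subst h8; decide
  by_cases h9 : ']' = ch; · subst h9; decide
  by_cases h10 : '|' = ch; · subst h10; decide
  by_cases h11 : '^' = ch; · subst h11; decide
  by_cases h12 : '$' = ch; · subst h12; decide
  by_cases h13 : '\\' = ch; · subst h13; decide
  have hi : pvSpecialChars.items =
      [('*', 2), ('+', 2), ('?', 1), ('{', 3), ('}', 3),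
       ('(', 2), (')', 2), ('[', 2), (']', 2), ('|', 3),
       ('^', 1), ('$', 1), ('\\', 1)] := by decide
  rw [hi]
  simp [pvScore, h1, h2, h3, h4, h5, h6, h7, h8, h9, h10, h11, h12, h13,
    Ne.symm h1, Ne.symm h2, Ne.symm h3, Ne.symm h4, Ne.symm h5, Ne.symm h6, Ne.symm h7,
    Ne.symm h8, Ne.symm h9, Ne.symm h10, Ne.symm h11, Ne.symm h12, Ne.symm h13]

-- A's total of count*score over the table equals the single-pass sum of scores.
theorem pv_table_sum (l : List Char) :
    (pvSpecialChars.items.map (fun cs => (l.count cs.1 : Int) * cs.2)).sum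
    = (l.map pvScore).sum := by
  induction l with
  | nil => decide
  | cons ch t ih =>
    have : ∀ cs : Char × Int,
        ((ch :: t).count cs.1 : Int) * cs.2
          = (t.count cs.1 : Int) * cs.2 + (if cs.1 = ch then (1 : Int) else 0) * cs.2 := by
      intro cs
      rcases eq_or_ne cs.1 ch with h | h
      · simp [h]; ring
      · simp [h, Ne.symm h]
    simp only [List.map_congr_left (fun cs _ => this cs)]
    rw [List.sum_map_add]
    simp only [List.map_cons, List.sum_cons, ih, pv_key_sum]
    ring

theorem pv_main (pattern : String) :
    calculate_regex_complexity_py pattern = calculate_regex_complexity_py_alt pattern := by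
  unfold calculate_regex_complexity_py calculate_regex_complexity_py_alt
  rw [PySem.List.foldl_add]
  have hc : ∀ cs : Char × Int,
      (PySem.Str.count pattern (String.ofList [cs.1]) : Int) * cs.2
        = (pattern.toList.count cs.1 : Int) * cs.2 := by
    intro cs
    rw [PySem.Str.count_eq]
    norm_num [pv_count_single]
  simp only [List.map_congr_left (fun cs _ => hc cs)]
  rw [pv_table_sum]
  ring

-- ===== VERDICT =====
theorem calculate_regex_complexity_py_spec : Claim_equal_calculate_regex_complexity_py := by
  intro pattern _
  unfold Spec_calculate_regex_complexity_py
  exact pv_main pattern
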